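-- pv_equiv track=rewrite | github.com/Xinlingluvdebreeze/FYP_Xinling_2020_21 | assembly_mapper_new.py | generate_variants_combinations
-- ===== SOURCE A (Python) =====
-- def generate_variants_combinations(reagents_fill_order, aligned_inputs, protocol, n_input_row, n_output):
--     output_list = []
--
--     for i in range(n_output):
--         output_list.append([])
--
--     for i in range(n_input_row):
--         count = 0
--         max_fill = 0
--         change_fragment = 0
--         while count<n_output:
--             if max_fill<reagents_fill_order[i]:
--                 output_list[count].append(aligned_inputs[i][change_fragment])
--                 count += 1
--                 max_fill += 1
--             elif change_fragment<protocol[i]-1: # change_fragment should not exceed fragments in respective row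
--                 change_fragment += 1
--                 max_fill = 0
--             else:
--                 change_fragment = 0
--                 max_fill = 0
--
--     return output_list
-- ===== SOURCE B (Python) =====
-- def generate_variants_combinations(reagents_fill_order, aligned_inputs, protocol, n_input_row, n_output):
--     return [[aligned_inputs[i][(j // reagents_fill_order[i]) % protocol[i]]
--              for i in range(n_input_row)]
--             for j in range(n_output)]
-- ===== Notes on version B (the rewrite author's own statement) =====
-- stated objective: simpler
-- what changed: Replaces A's per-row stepping while-loop (count/max_fill/change_fragment state mutated into pre-built empty columns) by a direct nested comprehension that computes each cell from the closed-form fragment index (j // fill_order[i]) % protocol[i].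
-- outside the precondition, e.g. on generate_variants_combinations([1], [['x']], [0], 1, 2): A returns [['x'], ['x']], B raises ZeroDivisionError; on generate_variants_combinations([1], [['x', 'y']], [-2], 1, 2): A returns [['x'], ['x']], B returns [['x'], ['y']]
import Mathlib
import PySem

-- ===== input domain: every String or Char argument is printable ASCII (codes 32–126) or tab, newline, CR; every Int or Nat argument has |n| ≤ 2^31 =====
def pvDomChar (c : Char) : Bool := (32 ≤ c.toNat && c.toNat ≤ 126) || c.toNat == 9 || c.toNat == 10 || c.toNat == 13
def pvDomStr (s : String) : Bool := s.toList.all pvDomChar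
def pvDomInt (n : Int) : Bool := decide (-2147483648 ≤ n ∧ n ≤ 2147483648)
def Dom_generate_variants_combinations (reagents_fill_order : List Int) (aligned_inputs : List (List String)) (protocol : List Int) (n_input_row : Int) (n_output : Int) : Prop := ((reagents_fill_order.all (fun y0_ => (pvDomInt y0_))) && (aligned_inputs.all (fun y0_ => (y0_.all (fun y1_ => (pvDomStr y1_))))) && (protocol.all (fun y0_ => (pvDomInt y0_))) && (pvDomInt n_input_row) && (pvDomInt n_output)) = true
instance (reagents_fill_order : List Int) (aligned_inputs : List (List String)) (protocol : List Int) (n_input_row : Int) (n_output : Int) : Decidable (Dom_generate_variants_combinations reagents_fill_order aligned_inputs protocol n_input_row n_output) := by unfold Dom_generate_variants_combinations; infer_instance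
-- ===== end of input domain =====

-- ===== PORT A =====
-- B replaces A's per-row stepping while-loop by a closed-form fragment index; objective: simpler.
-- gvcLoop is the literal port of A's while loop; the fuel only makes it total (inside
-- Pre_ the loop performs at most 2*n_output+1 iterations, so the fuel is never exhausted).
def gvcLoop (fill prot : Int) (row : List String) (n_out : Int) :
    List (List String) → Int → Int → Int → Nat → List (List String)
  | outs, _, _, _, 0 => outs
  | outs, count, max_fill, change_fragment, fuel+1 =>
    if count < n_out then
      if max_fill < fill then
        gvcLoop fill prot row n_out
          (PySem.List.pySetD outs count
            (PySem.List.pyGetD outs count [] ++ [PySem.List.pyGetD row change_fragment ""]))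
          (count+1) (max_fill+1) change_fragment fuel
      else if change_fragment < prot - 1 then
        gvcLoop fill prot row n_out outs count 0 (change_fragment+1) fuel
      else
        gvcLoop fill prot row n_out outs count 0 0 fuel
    else outs


def generate_variants_combinations (reagents_fill_order : List Int) (aligned_inputs : List (List String)) (protocol : List Int) (n_input_row : Int) (n_output : Int) : List (List String) :=
  (PySem.List.pyRange 0 n_input_row 1).foldl
    (fun outs i =>
      gvcLoop (PySem.List.pyGetD reagents_fill_order i 0) (PySem.List.pyGetD protocol i 0)
        (PySem.List.pyGetD aligned_inputs i []) n_output outs 0 0 0 (2 * n_output.toNat + 1))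
    ((PySem.List.pyRange 0 n_output 1).map (fun _ => ([] : List String)))

def generate_variants_combinations_alt (reagents_fill_order : List Int) (aligned_inputs : List (List String)) (protocol : List Int) (n_input_row : Int) (n_output : Int) : List (List String) :=
  (PySem.List.pyRange 0 n_output 1).map (fun j =>
    (PySem.List.pyRange 0 n_input_row 1).map (fun i =>
      PySem.List.pyGetD (PySem.List.pyGetD aligned_inputs i [])
        (PySem.Int.mod (PySem.Int.floordiv j (PySem.List.pyGetD reagents_fill_order i 0))
          (PySem.List.pyGetD protocol i 0)) ""))


-- ===== PRECONDITION & SPEC =====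
-- Pre_ excludes the inputs on which Python A raises IndexError (row i or fragment index out of
-- range) or never terminates (a nonpositive fill order), and the degenerate nonpositive
-- protocols, on which A silently reuses fragment 0 forever while B's modular index raises
-- (protocol 0) or wraps around (negative protocol).
def Pre_generate_variants_combinations (reagents_fill_order : List Int) (aligned_inputs : List (List String)) (protocol : List Int) (n_input_row : Int) (n_output : Int) : Prop :=
  n_output ≤ 0 ∨
    (n_input_row ≤ reagents_fill_order.length ∧ n_input_row ≤ aligned_inputs.length ∧
     n_input_row ≤ protocol.length ∧
     ∀ k : Nat, k < n_input_row.toNat →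
       1 ≤ reagents_fill_order.getD k 0 ∧ 1 ≤ protocol.getD k 0 ∧
       min (protocol.getD k 0 - 1) ((n_output - 1) / reagents_fill_order.getD k 0)
         < ((aligned_inputs.getD k []).length : Int))
instance (reagents_fill_order : List Int) (aligned_inputs : List (List String)) (protocol : List Int) (n_input_row : Int) (n_output : Int) : Decidable (Pre_generate_variants_combinations reagents_fill_order aligned_inputs protocol n_input_row n_output) := by unfold Pre_generate_variants_combinations; infer_instance

def pvWitness_generate_variants_combinations : List Int × List (List String) × List Int × Int × Int :=
  ([2, 1], [["a", "b"], ["x"]], [2, 1], 2, 4)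

def Spec_generate_variants_combinations (reagents_fill_order : List Int) (aligned_inputs : List (List String)) (protocol : List Int) (n_input_row : Int) (n_output : Int) (out : List (List String)) : Prop := out = generate_variants_combinations_alt reagents_fill_order aligned_inputs protocol n_input_row n_output
instance (reagents_fill_order : List Int) (aligned_inputs : List (List String)) (protocol : List Int) (n_input_row : Int) (n_output : Int) (out : List (List String)) : Decidable (Spec_generate_variants_combinations reagents_fill_order aligned_inputs protocol n_input_row n_output out) := by unfold Spec_generate_variants_combinations; infer_instance

-- ===== CLAIM (what is proved, stated in full; the proofs are below) =====
def Claim_equal_generate_variants_combinations : Prop := ∀ (reagents_fill_order : List Int) (aligned_inputs : List (List String)) (protocol : List Int) (n_input_row : Int) (n_output : Int), Dom_generate_variants_combinations reagents_fill_order aligned_inputs protocol n_input_row n_output → Pre_generate_variants_combinations reagents_fill_order aligned_inputs protocol n_input_row n_output → Spec_generate_variants_combinations reagents_fill_order aligned_inputs protocol n_input_row n_output (generate_variants_combinations reagents_fill_order aligned_inputs protocol n_input_row n_output)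

-- ===== LEMMAS AND PROOFS =====
lemma gvc_step_mod_lt {c b : Int} (hb : 0 < b) (h : c % b + 1 < b) :
    (c + 1) % b = c % b + 1 ∧ (c + 1) / b = c / b := by
  have h1 := Int.mul_ediv_add_emod c b
  have hr : 0 ≤ c % b := Int.emod_nonneg c (ne_of_gt hb)
  have e : c + 1 = (c % b + 1) + b * (c / b) := by omega
  constructor
  · rw [e, Int.add_mul_emod_self_left, Int.emod_eq_of_lt (by omega) h]
  · rw [e, Int.add_mul_ediv_left _ _ (ne_of_gt hb), Int.ediv_eq_zero_of_lt (by omega) h]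
    omega

lemma gvc_step_mod_eq {c b : Int} (hb : 0 < b) (h : c % b + 1 = b) :
    (c + 1) % b = 0 ∧ (c + 1) / b = c / b + 1 := by
  have h1 := Int.mul_ediv_add_emod c b
  have e2 : b * (c / b + 1) = b * (c / b) + b := by ring
  have e : c + 1 = b * (c / b + 1) := by omega
  constructor
  · rw [e, Int.mul_emod_right]
  · rw [e, Int.mul_ediv_cancel_left _ (ne_of_gt hb)]

lemma gvc_loop_done (fill prot : Int) (row : List String) (n_out : Int)
    (outs : List (List String)) (c mf cf : Int) (fuel : Nat) (h : n_out ≤ c) :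
    gvcLoop fill prot row n_out outs c mf cf fuel = outs := by
  cases fuel with
  | zero => rfl
  | succ f => simp [gvcLoop, not_lt.mpr h]

lemma gvc_point_step (outs res : List (List String)) (c : Int) (g : Int → String)
    (hc : 0 ≤ c) (hlen : c.toNat < outs.length)
    (H : ∀ idx : Nat, res[idx]? =
      if (idx : Int) < c + 1 then (outs.set c.toNat (outs[c.toNat]'hlen ++ [g c]))[idx]?
      else (outs.set c.toNat (outs[c.toNat]'hlen ++ [g c]))[idx]?.map
        (fun s => s ++ [g (idx : Int)])) :
    ∀ idx : Nat, res[idx]? =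
      if (idx : Int) < c then outs[idx]?
      else outs[idx]?.map (fun s => s ++ [g (idx : Int)]) := by
  intro idx
  rw [H idx]
  by_cases h1 : (idx : Int) < c
  · rw [if_pos (by omega), if_pos h1, List.getElem?_set]
    rw [if_neg (by omega)]
  · by_cases h2 : (idx : Int) < c + 1
    · have hix : c.toNat = idx := by omega
      rw [if_pos h2, if_neg h1, List.getElem?_set, if_pos hix, hix.symm,
          if_pos hlen, List.getElem?_eq_getElem hlen]
      have hcc : ((c.toNat : Int)) = c := by omega
      rw [hcc]
      rfl
    · rw [if_neg h2, if_neg h1, List.getElem?_set, if_neg (by omega)]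

lemma gvc_loop_char (fill prot : Int) (row : List String) (n_out : Int)
    (hf : 0 < fill) (hp : 0 < prot) :
    ∀ (k : Nat) (c : Int) (outs : List (List String)) (fuel : Nat),
      0 ≤ c → c + k = n_out → outs.length = n_out.toNat → 2 * k ≤ fuel →
      (gvcLoop fill prot row n_out outs c (c % fill) (c / fill % prot) fuel).length = outs.length ∧
      ∀ idx : Nat,
        (gvcLoop fill prot row n_out outs c (c % fill) (c / fill % prot) fuel)[idx]? =
          if (idx : Int) < c then outs[idx]?
          else outs[idx]?.map
            (fun s => s ++ [PySem.List.pyGetD row ((idx : Int) / fill % prot) ""]) := by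
  intro k
  induction k with
  | zero =>
    intro c outs fuel hc hck houts hfuel
    have hcn : c = n_out := by omega
    rw [gvc_loop_done _ _ _ _ _ _ _ _ _ (le_of_eq hcn.symm)]
    refine ⟨rfl, fun idx => ?_⟩
    by_cases hi : (idx : Int) < c
    · rw [if_pos hi]
    · rw [if_neg hi, List.getElem?_eq_none (show outs.length <= idx by omega)]
      rfl
  | succ k ih =>
    intro c outs fuel hc hck houts hfuel
    have hclt : c < n_out := by push_cast at hck; omega
    obtain ⟨f, rfl⟩ : ∃ f, fuel = f + 1 := ⟨fuel - 1, by omega⟩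
    have hmf : c % fill < fill := Int.emod_lt_of_pos c hf
    have hmf0 : 0 ≤ c % fill := Int.emod_nonneg c (ne_of_gt hf)
    have hclen : c.toNat < outs.length := by omega
    have hget : PySem.List.pyGetD outs c [] = outs[c.toNat]'hclen := by
      rw [PySem.List.pyGetD_eq_getElem outs [] hc (by push_cast; omega)]
    have hset : PySem.List.pySetD outs c
        (PySem.List.pyGetD outs c [] ++ [PySem.List.pyGetD row (c / fill % prot) ""]) =
        outs.set c.toNat (outs[c.toNat]'hclen ++ [PySem.List.pyGetD row (c / fill % prot) ""]) := by
      rw [PySem.List.pySetD_of_nonneg outs _ hc, hget]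
    simp only [gvcLoop]
    rw [if_pos hclt, if_pos hmf, hset]
    set g : Int → String := fun j => PySem.List.pyGetD row (j / fill % prot) "" with hg
    have hgc : PySem.List.pyGetD row (c / fill % prot) "" = g c := rfl
    rw [hgc]
    set outs' := outs.set c.toNat (outs[c.toNat]'hclen ++ [g c]) with houts'
    have hlen' : outs'.length = outs.length := by rw [houts', List.length_set]
    -- common finish from a characterization of the tail run at cutoff c+1 over outs'
    have finish : ∀ res : List (List String),
        res.length = outs'.length →
        (∀ idx : Nat, res[idx]? =
          if (idx : Int) < c + 1 then outs'[idx]?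
          else outs'[idx]?.map (fun s => s ++ [g (idx : Int)])) →
        res.length = outs.length ∧
        ∀ idx : Nat, res[idx]? =
          if (idx : Int) < c then outs[idx]?
          else outs[idx]?.map (fun s => s ++ [g (idx : Int)]) := by
      intro res hL H
      exact ⟨by omega, gvc_point_step outs res c g hc hclen H⟩
    by_cases hA : c % fill + 1 < fill
    · obtain ⟨e1, e2⟩ := gvc_step_mod_lt hf hA
      rw [show c % fill + 1 = (c + 1) % fill from e1.symm,
          show c / fill % prot = (c + 1) / fill % prot from by rw [e2]]
      obtain ⟨L, H⟩ := ih (c + 1) outs' f (by omega) (by push_cast at hck ⊢; omega)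
        (by omega) (by omega)
      exact finish _ (by omega) H
    · have hB : c % fill + 1 = fill := by omega
      obtain ⟨e1, e2⟩ := gvc_step_mod_eq hf hB
      by_cases hkn : c + 1 < n_out
      · have hk1 : 1 ≤ k := by push_cast at hck; omega
        obtain ⟨f', rfl⟩ : ∃ f', f = f' + 1 := ⟨f - 1, by omega⟩
        rw [hB]
        simp only [gvcLoop]
        rw [if_pos hkn, if_neg (lt_irrefl fill)]
        have hq0 : 0 ≤ c / fill := Int.ediv_nonneg hc (le_of_lt hf)
        have hqlt : c / fill % prot < prot := Int.emod_lt_of_pos _ hp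
        have hq0' : 0 ≤ c / fill % prot := Int.emod_nonneg _ (ne_of_gt hp)
        by_cases hcf : c / fill % prot < prot - 1
        · rw [if_pos hcf]
          have hlt : (c / fill) % prot + 1 < prot := by omega
          obtain ⟨e3, _⟩ := gvc_step_mod_lt hp hlt
          rw [show c / fill % prot + 1 = (c + 1) / fill % prot from by rw [e2, e3],
              show (0 : Int) = (c + 1) % fill from e1.symm]
          obtain ⟨L, H⟩ := ih (c + 1) outs' f' (by omega) (by push_cast at hck ⊢; omega)
            (by omega) (by omega)
          exact finish _ (by omega) H
        · rw [if_neg hcf]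
          have heq : c / fill % prot + 1 = prot := by omega
          obtain ⟨e3, _⟩ := gvc_step_mod_eq hp heq
          have hz : (c + 1) / fill % prot = 0 := by rw [e2, e3]
          have hsw : gvcLoop fill prot row n_out outs' (c + 1) 0 0 f' =
              gvcLoop fill prot row n_out outs' (c + 1) ((c + 1) % fill) ((c + 1) / fill % prot) f' := by
            rw [e1, hz]
          rw [hsw]
          obtain ⟨L, H⟩ := ih (c + 1) outs' f' (by omega) (by push_cast at hck ⊢; omega)
            (by omega) (by omega)
          exact finish _ (by omega) H
      · rw [hB, gvc_loop_done _ _ _ _ _ _ _ _ _ (by omega)]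
        refine finish _ rfl (fun idx => ?_)
        by_cases hi : (idx : Int) < c + 1
        · rw [if_pos hi]
        · rw [if_neg hi, List.getElem?_eq_none (show outs'.length <= idx by omega)]
          rfl

lemma gvc_fold_char (rfo : List Int) (ai : List (List String)) (prot : List Int) (n_out : Int) :
    ∀ (l : List Int) (outs : List (List String)),
      outs.length = n_out.toNat →
      (∀ i ∈ l, 0 < PySem.List.pyGetD rfo i 0 ∧ 0 < PySem.List.pyGetD prot i 0) →
      (l.foldl (fun o i =>
          gvcLoop (PySem.List.pyGetD rfo i 0) (PySem.List.pyGetD prot i 0)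
            (PySem.List.pyGetD ai i []) n_out o 0 0 0 (2 * n_out.toNat + 1)) outs).length
        = n_out.toNat ∧
      ∀ idx : Nat,
        (l.foldl (fun o i =>
            gvcLoop (PySem.List.pyGetD rfo i 0) (PySem.List.pyGetD prot i 0)
              (PySem.List.pyGetD ai i []) n_out o 0 0 0 (2 * n_out.toNat + 1)) outs)[idx]? =
          outs[idx]?.map (fun s => s ++ l.map (fun i =>
            PySem.List.pyGetD (PySem.List.pyGetD ai i [])
              ((idx : Int) / PySem.List.pyGetD rfo i 0 % PySem.List.pyGetD prot i 0) "")) := by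
  intro l
  induction l with
  | nil =>
    intro outs houts _
    refine ⟨houts, fun idx => ?_⟩
    cases h : outs[idx]? with
    | none => rw [List.foldl_nil, h]; rfl
    | some s => rw [List.foldl_nil, h]; simp
  | cons a l ih =>
    intro outs houts hcond
    obtain ⟨hfa, hpa⟩ := hcond a (List.mem_cons_self ..)
    by_cases hn : 0 ≤ n_out
    case neg =>
      -- n_out < 0 : every loop returns its input unchanged and outs is []
      have houts0 : outs = [] := by
        cases outs with
        | nil => rfl
        | cons x xs => simp at houts; omega
      subst houts0
      have hall : ∀ (m : List Int), (m.foldl (fun o i =>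
          gvcLoop (PySem.List.pyGetD rfo i 0) (PySem.List.pyGetD prot i 0)
            (PySem.List.pyGetD ai i []) n_out o 0 0 0 (2 * n_out.toNat + 1)) ([] : List (List String))) = [] := by
        intro m
        induction m with
        | nil => rfl
        | cons b m ihm =>
          rw [List.foldl_cons, gvc_loop_done _ _ _ _ _ 0 0 0 _ (show n_out ≤ 0 by omega)]
          exact ihm
      rw [List.foldl_cons, gvc_loop_done _ _ _ _ _ 0 0 0 _ (show n_out ≤ 0 by omega), hall l]
      refine ⟨by omega, fun idx => by cases h : ([] : List (List String))[idx]? <;> simp_all⟩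
    case pos =>
      simp only [List.foldl_cons]
      obtain ⟨L1, H1⟩ := gvc_loop_char (PySem.List.pyGetD rfo a 0) (PySem.List.pyGetD prot a 0)
        (PySem.List.pyGetD ai a []) n_out hfa hpa n_out.toNat 0 outs (2 * n_out.toNat + 1)
        (le_refl 0) (by omega) houts (by omega)
      have hswap : gvcLoop (PySem.List.pyGetD rfo a 0) (PySem.List.pyGetD prot a 0)
            (PySem.List.pyGetD ai a []) n_out outs 0 ((0 : Int) % PySem.List.pyGetD rfo a 0)
            ((0 : Int) / PySem.List.pyGetD rfo a 0 % PySem.List.pyGetD prot a 0)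
            (2 * n_out.toNat + 1) =
          gvcLoop (PySem.List.pyGetD rfo a 0) (PySem.List.pyGetD prot a 0)
            (PySem.List.pyGetD ai a []) n_out outs 0 0 0 (2 * n_out.toNat + 1) := by
        simp
      rw [hswap] at L1 H1
      obtain ⟨L2, H2⟩ := ih (gvcLoop (PySem.List.pyGetD rfo a 0) (PySem.List.pyGetD prot a 0)
          (PySem.List.pyGetD ai a []) n_out outs 0 0 0 (2 * n_out.toNat + 1))
        (by omega) (fun i hi => hcond i (List.mem_cons_of_mem a hi))
      refine ⟨L2, fun idx => ?_⟩
      rw [H2 idx, H1 idx, if_neg (by omega)]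
      cases h : outs[idx]? with
      | none => rfl
      | some s => simp


-- ===== VERDICT (by name: the statement is the Claim_ definition above) =====
theorem generate_variants_combinations_spec : Claim_equal_generate_variants_combinations := by
  intro rfo ai prot n_in n_out _ hPre
  unfold Pre_generate_variants_combinations at hPre
  unfold Spec_generate_variants_combinations
  unfold generate_variants_combinations generate_variants_combinations_alt
  by_cases hno : n_out ≤ 0
  · rw [PySem.List.pyRange_one_eq_nil hno]
    simp only [List.map_nil]
    have hall : ∀ (m : List Int), (m.foldl (fun o i =>
        gvcLoop (PySem.List.pyGetD rfo i 0) (PySem.List.pyGetD prot i 0)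
          (PySem.List.pyGetD ai i []) n_out o 0 0 0 (2 * n_out.toNat + 1)) ([] : List (List String))) = [] := by
      intro m
      induction m with
      | nil => rfl
      | cons b m ihm =>
        rw [List.foldl_cons, gvc_loop_done _ _ _ _ _ 0 0 0 _ (show n_out ≤ 0 from hno)]
        exact ihm
    exact hall _
  · have hc := hPre.resolve_left hno
    obtain ⟨h1, h2, h3, h4⟩ := hc
    have hn : 0 ≤ n_out := by omega
    have hcond : ∀ i ∈ PySem.List.pyRange 0 n_in 1,
        0 < PySem.List.pyGetD rfo i 0 ∧ 0 < PySem.List.pyGetD prot i 0 := by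
      intro i hi
      rw [PySem.List.mem_pyRange_one] at hi
      have hi0 : 0 ≤ i := hi.1
      have hieq : i = ((i.toNat : Int)) := by omega
      have hk := h4 i.toNat (by omega)
      rw [hieq, PySem.List.pyGetD_natCast, PySem.List.pyGetD_natCast]
      omega
    obtain ⟨L, H⟩ := gvc_fold_char rfo ai prot n_out (PySem.List.pyRange 0 n_in 1)
      ((PySem.List.pyRange 0 n_out 1).map (fun _ => ([] : List String)))
      (by rw [List.length_map, PySem.List.length_pyRange_one]; omega) hcond
    apply List.ext_getElem?
    intro idx
    rw [H idx]
    by_cases hidx : idx < n_out.toNat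
    · have hrw : n_out = ((n_out.toNat : Int)) := by omega
      rw [hrw, PySem.List.getElem?_map_pyRange_zero _ _ _ hidx,
          PySem.List.getElem?_map_pyRange_zero _ _ _ hidx]
      simp only [Option.map_some, List.nil_append]
      congr 1
      apply List.map_congr_left
      intro i hi
      obtain ⟨hfa, hpa⟩ := hcond i hi
      rw [PySem.Int.mod_eq_emod_of_pos hpa, PySem.Int.floordiv_eq_ediv_of_pos hfa]
    · rw [List.getElem?_eq_none (by rw [List.length_map, PySem.List.length_pyRange_one]; omega),
          List.getElem?_eq_none (by rw [List.length_map, PySem.List.length_pyRange_one]; omega)]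
      rfl
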